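-- pv_equiv track=rewrite | github.com/Henrique-de-la-Pena/projetoEP2 | funcoes.py | calcula_pontos_full_house
-- ===== SOURCE A (Python) =====
-- def calcula_pontos_full_house(dados_rolados):
--     dados = {}
--     soma = 0
--     for i in range(len(dados_rolados)):
--         if dados_rolados[i] not in dados:
--             dados[dados_rolados[i]] = 1
--         else:
--             dados[dados_rolados[i]] += 1
--     if len(dados) == 2:
--         for qtd in dados.values():
--             if qtd == 2:
--                 for valor, vezes in dados.items():
--                     soma += valor * vezes
--     return soma
-- ===== SOURCE B (Python) =====
-- def _runs(ys):
--     # run-length encode a sorted list: [(value, run length), ...]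
--     runs = []
--     i = 0
--     while i < len(ys):
--         j = i
--         while j < len(ys) and ys[j] == ys[i]:
--             j += 1
--         runs.append((ys[i], j - i))
--         i = j
--     return runs
--
-- def calcula_pontos_full_house(dados_rolados):
--     runs = _runs(sorted(dados_rolados))
--     if len(runs) != 2:
--         return 0
--     pares = sum(1 for _, c in runs if c == 2)
--     total = sum(v * c for v, c in runs)
--     return pares * total
-- ===== Notes on version B (the rewrite author's own statement) =====
-- stated objective: alternative
-- what changed: Instead of building a frequency dict and re-summing all dict items once per count equal to 2, B sorts the roll and run-length-encodes the sorted list with a two-pointer scan; from the run list it takes (#runs of length 2) * sum of value*run-length when there are exactly 2 runs, else 0.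
import Mathlib
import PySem

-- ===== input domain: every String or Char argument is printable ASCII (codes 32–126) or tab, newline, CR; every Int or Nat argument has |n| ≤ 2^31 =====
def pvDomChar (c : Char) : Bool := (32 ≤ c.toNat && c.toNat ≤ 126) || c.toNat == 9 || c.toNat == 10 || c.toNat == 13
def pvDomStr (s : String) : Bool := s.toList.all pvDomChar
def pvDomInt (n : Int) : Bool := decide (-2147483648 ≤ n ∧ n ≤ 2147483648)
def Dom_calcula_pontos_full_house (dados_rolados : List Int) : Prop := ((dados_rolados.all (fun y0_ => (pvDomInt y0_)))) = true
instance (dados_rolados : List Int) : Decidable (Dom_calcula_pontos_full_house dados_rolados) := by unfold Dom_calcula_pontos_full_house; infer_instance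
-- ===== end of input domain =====

-- B sorts the roll and run-length-encodes the sorted list by recursion on leading runs,
-- then scores from the run list, instead of A's frequency dict with nested re-summing loops;
-- objective: alternative (different algorithm, similar cost).

-- ===== PORT A =====
def calcula_pontos_full_house (dados_rolados : List Int) : Int :=
  -- for i in range(len(dados_rolados)): build the frequency dict
  let dados : PySem.Dict Int Int :=
    (PySem.List.pyRange 0 (PySem.List.len dados_rolados)).foldl
      (fun d i =>
        -- dados_rolados[i]; i is in range by construction, so the total pyGetD is exact
        if d.contains (PySem.List.pyGetD dados_rolados i 0) = false then
          d.insert (PySem.List.pyGetD dados_rolados i 0) 1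
        else
          d.insert (PySem.List.pyGetD dados_rolados i 0)
            (d.getD (PySem.List.pyGetD dados_rolados i 0) 0 + 1))
      PySem.Dict.empty
  if dados.size = 2 then
    -- for qtd in dados.values(): if qtd == 2: for valor, vezes in dados.items(): soma += valor * vezes
    dados.values.foldl
      (fun soma qtd =>
        if qtd = 2 then dados.items.foldl (fun s p => s + p.1 * p.2) soma else soma)
      0
  else 0

-- ===== PORT B =====
-- _runs(ys): run-length encoding of a sorted list by a two-pointer scan. The outer loop's
-- index i is represented by the remaining suffix ys[i:] (recursion on it); the inner while
-- that advances j over the run of elements equal to ys[i] is the takeWhile length, so the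
-- recorded run length j - i is k + 1 (head plus equal tail) and i = j is dropping the run.
def pvRunsB : List Int → List (Int × Int)
  | [] => []
  | v :: t =>
    let k := (t.takeWhile (fun y => y == v)).length
    (v, (k : Int) + 1) :: pvRunsB (t.drop k)
termination_by ys => ys.length
decreasing_by
  simp only [List.length_drop, List.length_cons]
  omega

def calcula_pontos_full_house_alt (dados_rolados : List Int) : Int :=
  let runs := pvRunsB (PySem.List.sorted dados_rolados (fun x => x) false)
  if runs.length ≠ 2 then 0
  else
    let pares : Int := (runs.map (fun p => if p.2 = 2 then (1 : Int) else 0)).sum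
    let total : Int := (runs.map (fun p => p.1 * p.2)).sum
    pares * total

-- ===== PRECONDITION & SPEC =====
def Spec_calcula_pontos_full_house (dados_rolados : List Int) (out : Int) : Prop := out = calcula_pontos_full_house_alt dados_rolados
instance (dados_rolados : List Int) (out : Int) : Decidable (Spec_calcula_pontos_full_house dados_rolados out) := by unfold Spec_calcula_pontos_full_house; infer_instance

-- ===== CLAIM (what is proved, stated in full; the proofs are below) =====
def Claim_equal_calcula_pontos_full_house : Prop := ∀ (dados_rolados : List Int), Dom_calcula_pontos_full_house dados_rolados → Spec_calcula_pontos_full_house dados_rolados (calcula_pontos_full_house dados_rolados)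

-- ===== LEMMAS AND PROOFS =====

-- A's dict-building loop is Counter(dados_rolados)
lemma dict_loop_eq_counter (xs : List Int) :
    (PySem.List.pyRange 0 (PySem.List.len xs)).foldl
      (fun d i =>
        if d.contains (PySem.List.pyGetD xs i 0) = false then
          d.insert (PySem.List.pyGetD xs i 0) 1
        else
          d.insert (PySem.List.pyGetD xs i 0) (d.getD (PySem.List.pyGetD xs i 0) 0 + 1))
      PySem.Dict.empty = PySem.Dict.counter xs := by
  have h1 : (List.map (fun j => PySem.List.pyGetD xs j 0) (PySem.List.pyRange 0 (PySem.List.len xs))).foldl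
      (fun d x => if d.contains x = false then d.insert x 1 else d.insert x (d.getD x 0 + 1))
      (PySem.Dict.empty : PySem.Dict Int Int) = PySem.Dict.counter xs := by
    rw [PySem.List.map_pyGetD_pyRange_zero,
      PySem.List.foldl_congr_mem xs _ (fun d x => d.insert x (d.getD x 0 + 1)) _ ?_,
      PySem.Dict.foldl_insert_getD_add_one_eq_counter]
    intro d x _
    by_cases h : d.contains x = false
    · simp [h, PySem.Dict.getD_of_not_contains d 0 h]
    · simp [h]
  exact (List.foldl_map (f := fun j => PySem.List.pyGetD xs j 0)
    (g := fun d x => if d.contains x = false then d.insert x 1 else d.insert x (d.getD x 0 + 1))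
    (l := PySem.List.pyRange 0 (PySem.List.len xs))
    (init := (PySem.Dict.empty : PySem.Dict Int Int))).symm.trans h1

-- over a nodup list, the sum of (if x = k then k else 0) picks out x
lemma sum_ite_self (x : Int) : ∀ (S : List Int), S.Nodup → x ∈ S →
    (S.map (fun k => if x = k then k else 0)).sum = x := by
  intro S
  induction S with
  | nil => intro _ hx; simp at hx
  | cons s ss ih =>
    intro hnd hx
    rcases List.mem_cons.mp hx with h | h
    · subst h
      have hz : ∀ k ∈ ss, (if x = k then k else 0) = 0 := by
        intro k hk
        have : x ≠ k := fun he => (List.nodup_cons.mp hnd).1 (he ▸ hk)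
        simp [this]
      have : (ss.map (fun k => if x = k then k else 0)).sum = 0 := by
        apply List.sum_eq_zero
        intro a ha
        rcases List.mem_map.mp ha with ⟨k, hk, rfl⟩
        exact hz k hk
      simp [this]
    · have hxs : x ≠ s := fun he => (List.nodup_cons.mp hnd).1 (he ▸ h)
      simp only [List.map_cons, List.sum_cons, if_neg hxs]
      rw [ih (List.nodup_cons.mp hnd).2 h]
      ring

-- the sum of k * count(k) over a nodup list covering xs is the sum of xs
lemma sum_mul_count (xs S : List Int) (hnd : S.Nodup) (hcov : ∀ y ∈ xs, y ∈ S) :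
    (S.map (fun k => k * (xs.count k : Int))).sum = xs.sum := by
  induction xs with
  | nil => simp
  | cons x t ih =>
    have hx : x ∈ S := hcov x List.mem_cons_self
    have hsplit : (S.map (fun k => k * ((x :: t).count k : Int))).sum
        = (S.map (fun k => k * (t.count k : Int))).sum
          + (S.map (fun k => if x = k then k else 0)).sum := by
      rw [← List.sum_map_add]
      apply congrArg
      apply List.map_congr_left
      intro k _
      by_cases hk : x = k
      · subst hk; simp; ring
      · have hne : ¬ (k = x) := fun he => hk he.symm
        simp [hk]
    rw [hsplit, ih (fun y hy => hcov y (List.mem_cons_of_mem _ hy)),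
      sum_ite_self x S hnd hx]
    simp [List.sum_cons]; ring

-- A reduced to a closed form over the distinct values of xs
lemma A_closed (xs : List Int) :
    calcula_pontos_full_house xs
      = if (PySem.Set.ofList xs).length = 2 then
          (((PySem.Set.ofList xs).countP (fun v => decide (xs.count v = 2)) : Nat) : Int) * xs.sum
        else 0 := by
  simp only [calcula_pontos_full_house]
  rw [dict_loop_eq_counter]
  have hitems := PySem.Dict.items_counter xs
  have hS : ((PySem.Dict.counter xs).items.map (fun p : Int × Int => p.1 * p.2)).sum = xs.sum := by
    rw [hitems, List.map_map]
    exact sum_mul_count xs _ (PySem.Set.nodup_ofList xs)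
      (fun y hy => (PySem.Set.mem_ofList xs y).mpr hy)
  have hsize : (PySem.Dict.counter xs).size = (PySem.Set.ofList xs).length := by
    simp [PySem.Dict.size, hitems]
  have hvalues : (PySem.Dict.counter xs).values
      = (PySem.Set.ofList xs).map (fun k => (xs.count k : Int)) := by
    simp only [PySem.Dict.values, hitems, List.map_map]
    rfl
  by_cases h2 : (PySem.Set.ofList xs).length = 2
  · rw [if_pos (by rw [hsize]; exact h2), if_pos h2]
    have hinner : ∀ (soma : Int),
        (PySem.Dict.counter xs).items.foldl (fun s p => s + p.1 * p.2) soma = soma + xs.sum := by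
      intro soma
      rw [PySem.List.foldl_add _ (fun p : Int × Int => p.1 * p.2) soma, hS]
    have hcong : (PySem.Dict.counter xs).values.foldl
        (fun soma qtd => if qtd = 2 then (PySem.Dict.counter xs).items.foldl (fun s p => s + p.1 * p.2) soma else soma) 0
        = (PySem.Dict.counter xs).values.foldl
          (fun soma qtd => if (qtd == 2) = true then soma + xs.sum else soma) 0 := by
      apply PySem.List.foldl_congr_mem
      intro soma qtd _
      by_cases hq : qtd = 2 <;> simp [hq, hinner soma]
    rw [hcong,
      PySem.List.foldl_if_eq_foldl_filter (fun qtd => qtd == 2) (fun s _ => s + xs.sum),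
      PySem.List.foldl_add _ (fun _ => xs.sum) 0, PySem.List.sum_map_const_int,
      ← List.countP_eq_length_filter]
    have hcnt : (PySem.Dict.counter xs).values.countP (fun qtd => qtd == 2)
        = (PySem.Set.ofList xs).countP (fun v => decide (xs.count v = 2)) := by
      rw [hvalues, List.countP_map]
      apply List.countP_congr
      intro k _
      simp [Function.comp]
      omega
    rw [hcnt]; ring
  · rw [if_neg (by rw [hsize]; exact h2), if_neg h2]

-- the recursion step of pvRunsB drops exactly the dropWhile tail
lemma drop_takeWhile_len (t : List Int) (p : Int → Bool) :
    t.drop (t.takeWhile p).length = t.dropWhile p := by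
  induction t with
  | nil => simp
  | cons a t ih =>
    by_cases h : p a
    · simp [h, ih]
    · simp [h]

-- on a sorted list, pvRunsB produces one pair per distinct value, carrying its count
lemma runsB_spec : ∀ ys : List Int, ys.Pairwise (· ≤ ·) →
    ((pvRunsB ys).map Prod.fst).Nodup ∧
    (∀ a, a ∈ (pvRunsB ys).map Prod.fst ↔ a ∈ ys) ∧
    (∀ p ∈ pvRunsB ys, p.2 = (ys.count p.1 : Int)) := by
  intro ys
  induction ys using pvRunsB.induct with
  | case1 => intro _; refine ⟨by simp [pvRunsB], by simp [pvRunsB], by simp [pvRunsB]⟩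
  | case2 v t k ih =>
    intro hs
    have hunf : pvRunsB (v :: t) = (v, (k : Int) + 1) :: pvRunsB (t.drop k) := by
      rw [pvRunsB]
    have hvle : ∀ x ∈ t, v ≤ x := fun x hx => (List.pairwise_cons.mp hs).1 x hx
    have hst : t.Pairwise (· ≤ ·) := (List.pairwise_cons.mp hs).2
    have hdrop : t.drop k = t.dropWhile (fun y => y == v) := drop_takeWhile_len t _
    have hsrest : (t.drop k).Pairwise (· ≤ ·) := by
      rw [hdrop]; exact hst.sublist (List.dropWhile_sublist _)
    have htw : ∀ x ∈ t.takeWhile (fun y => y == v), x = v := by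
      intro x hx
      have := List.mem_takeWhile_imp hx
      exact beq_iff_eq.mp this
    have hvnot : v ∉ t.drop k := by
      rw [hdrop]
      intro hv
      rcases hrest : t.dropWhile (fun y => y == v) with _ | ⟨r, rr⟩
      · rw [hrest] at hv; simp at hv
      · have hrne : ¬ (r == v) = true := by
          have := List.head?_dropWhile_not (fun y => y == v) t
          rw [hrest] at this; simp at this; simp [this]
        have hrv : r ≠ v := fun he => hrne (by simp [he])
        have hrt : r ∈ t := (List.dropWhile_sublist _).subset (hrest ▸ List.mem_cons_self)
        have hvr : v ≤ r := hvle r hrt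
        rw [hrest] at hv
        rcases List.mem_cons.mp hv with h | h
        · exact hrv h.symm
        · have hsr : (r :: rr).Pairwise (· ≤ ·) := by
            rw [← hrest]; exact hst.sublist (List.dropWhile_sublist _)
          have : r ≤ v := (List.pairwise_cons.mp hsr).1 v h
          exact hrv (le_antisymm this hvr)
    obtain ⟨ihnd, ihmem, ihcnt⟩ := ih hsrest
    have hcountv : (v :: t).count v = k + 1 := by
      have h1 : (t.takeWhile (fun y => y == v)).count v = k := by
        have := List.count_eq_length.mpr (fun b hb => (htw b hb).symm)
        simpa using this
      have h2 : (t.drop k).count v = 0 := List.count_eq_zero.mpr hvnot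
      have h3 : t.count v = k := by
        conv_lhs => rw [← List.takeWhile_append_dropWhile (p := fun y => y == v) (l := t)]
        rw [List.count_append, h1, ← hdrop, h2]
        omega
      simp [List.count_cons_self, h3]
    -- (the `simp` above closes the arithmetic k + 0 = k as part of the count)
    refine ⟨?_, ?_, ?_⟩
    · rw [hunf, List.map_cons]
      exact List.nodup_cons.mpr ⟨fun hv => hvnot ((ihmem v).mp hv), ihnd⟩
    · intro a
      rw [hunf, List.map_cons]
      simp only [List.mem_cons, ihmem]
      constructor
      · rintro (rfl | h)
        · exact .inl rfl
        · have hat : a ∈ t := (List.drop_sublist k t).subset h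
          exact .inr hat
      · rintro (rfl | h)
        · exact .inl rfl
        · -- a ∈ t: either in the takeWhile part (then a = v) or in the drop
          conv at h => rw [← List.takeWhile_append_dropWhile (p := fun y => y == v) (l := t)]
          rcases List.mem_append.mp h with h | h
          · exact .inl (htw a h)
          · exact .inr (hdrop ▸ h)
    · intro p hp
      rw [hunf] at hp
      simp only [List.mem_cons] at hp
      rcases hp with rfl | hp
      · simp only [hcountv]; push_cast; ring
      · have hmem : p.1 ∈ t.drop k := (ihmem p.1).mp (List.mem_map.mpr ⟨p, hp, rfl⟩)
        have hne : p.1 ≠ v := fun he => hvnot (he ▸ hmem)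
        have htwc : (t.takeWhile (fun y => y == v)).count p.1 = 0 :=
          List.count_eq_zero.mpr (fun hx => hne (htw _ hx))
        have hcount : (v :: t).count p.1 = (t.drop k).count p.1 := by
          rw [List.count_cons_of_ne hne.symm]
          conv_lhs => rw [← List.takeWhile_append_dropWhile (p := fun y => y == v) (l := t)]
          rw [List.count_append, htwc, ← hdrop]
          simp
        rw [hcount]
        exact ihcnt p hp

-- ===== VERDICT (by name: the statement is the Claim_ definition above) =====
theorem calcula_pontos_full_house_spec : Claim_equal_calcula_pontos_full_house := by
  intro xs _
  unfold Spec_calcula_pontos_full_house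
  rw [A_closed]
  simp only [calcula_pontos_full_house_alt]
  set ys := PySem.List.sorted xs (fun x => x) false with hys
  have hperm : ys.Perm xs := PySem.List.sorted_perm xs _ _
  have hpw : ys.Pairwise (· ≤ ·) := by
    have := PySem.List.sorted_pairwise (xs := xs) (key := fun x => x)
    simpa using this
  obtain ⟨hnd, hmem, hcnt⟩ := runsB_spec ys hpw
  set H := (pvRunsB ys).map Prod.fst with hH
  have hHperm : H.Perm (PySem.Set.ofList xs) := by
    refine (List.perm_ext_iff_of_nodup hnd (PySem.Set.nodup_ofList xs)).mpr ?_
    intro a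
    rw [hmem a, PySem.Set.mem_ofList, hperm.mem_iff]
  have hlen : (pvRunsB ys).length = (PySem.Set.ofList xs).length := by
    have : H.length = (PySem.Set.ofList xs).length := hHperm.length_eq
    simpa [hH] using this
  by_cases h2 : (PySem.Set.ofList xs).length = 2
  · rw [if_pos h2, if_neg (by rw [hlen]; simp [h2])]
    have hcxs : ∀ a, ys.count a = xs.count a := fun a => hperm.count_eq a
    -- total = xs.sum
    have htotal : ((pvRunsB ys).map (fun p => p.1 * p.2)).sum = xs.sum := by
      have hmapeq : (pvRunsB ys).map (fun p => p.1 * p.2)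
          = (pvRunsB ys).map (fun p => p.1 * (xs.count p.1 : Int)) := by
        apply List.map_congr_left
        intro p hp
        rw [hcnt p hp, hcxs]
      rw [hmapeq]
      have : (pvRunsB ys).map (fun p => p.1 * (xs.count p.1 : Int))
          = H.map (fun k => k * (xs.count k : Int)) := by
        simp [hH, List.map_map, Function.comp]
      rw [this]
      have hsum := sum_mul_count xs H hnd
        (fun y hy => (hmem y).mpr (hperm.mem_iff.mpr hy))
      exact hsum
    -- pares = countP
    have hpares : ((pvRunsB ys).map (fun p => if p.2 = 2 then (1 : Int) else 0)).sum
        = (((PySem.Set.ofList xs).countP (fun v => decide (xs.count v = 2)) : Nat) : Int) := by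
      have hmapeq : (pvRunsB ys).map (fun p => if p.2 = 2 then (1 : Int) else 0)
          = H.map (fun k => if decide (xs.count k = 2) = true then (1 : Int) else 0) := by
        simp only [hH, List.map_map]
        apply List.map_congr_left
        intro p hp
        simp only [Function.comp]
        rw [hcnt p hp, hcxs]
        by_cases h : xs.count p.1 = 2
        · simp [h]
        · have : ((xs.count p.1 : Nat) : Int) ≠ 2 := by exact_mod_cast h
          simp [h, this]
      rw [hmapeq]
      rw [PySem.List.sum_map_ite_one_zero (fun k => decide (xs.count k = 2)) H]
      congr 1
      exact hHperm.countP_eq _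
    rw [htotal, hpares]
  · rw [if_neg h2, if_pos (by rw [hlen]; simp [h2])]
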